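-- pv_equiv track=rewrite | github.com/linhdvu14/cp-sols | sols/CodeForces/1613_edu/C_Poisoned_Dagger.py | solve
-- ===== SOURCE A (Python) =====
-- def solve(N, H, A):
-- 	def is_ok(K):
-- 		cnt = K
-- 		for i in range(N-1):
-- 			cnt += min(A[i+1]-A[i], K)
-- 		return cnt >= H
--
-- 	res, lo, hi = -1, 1, H
-- 	while lo <= hi:
-- 		mi = (lo+hi) // 2
-- 		if is_ok(mi):
-- 			res = mi
-- 			hi = mi-1
-- 		else:
-- 			lo = mi+1
--
-- 	return res
-- ===== SOURCE B (Python) =====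
-- def solve(N, H, A):
--     # Sort the gaps, then walk the segments between consecutive sorted gap
--     # values, solving the linear inequality for K in closed form per segment.
--     gaps = sorted(A[i + 1] - A[i] for i in range(N - 1))
--     s = 0              # sum of gaps already fully counted (gaps <= K)
--     rem = len(gaps)    # gaps still capped at K
--     L = 1              # smallest K in the current segment
--     for g in gaps:
--         R = min(H, g - 1)
--         if L <= R:
--             K = max(L, -(-(H - s) // (rem + 1)))
--             if K <= R:
--                 return K
--         s += g
--         rem -= 1
--         L = max(L, g)
--     if L <= H:
--         K = max(L, H - s)
--         if K <= H:
--             return K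
--     return -1
-- ===== Notes on version B (the rewrite author's own statement) =====
-- stated objective: faster
-- what changed: Replaces A's binary search over K (each probe rescanning all N-1 gaps) by sorting the gaps once, then a single scan over the segments between consecutive sorted gap values that solves the linear damage inequality for K in closed form with a ceiling division.
-- outside the precondition, e.g. on solve(3, 0, [1]): A returns -1, B raises IndexError
import Mathlib
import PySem

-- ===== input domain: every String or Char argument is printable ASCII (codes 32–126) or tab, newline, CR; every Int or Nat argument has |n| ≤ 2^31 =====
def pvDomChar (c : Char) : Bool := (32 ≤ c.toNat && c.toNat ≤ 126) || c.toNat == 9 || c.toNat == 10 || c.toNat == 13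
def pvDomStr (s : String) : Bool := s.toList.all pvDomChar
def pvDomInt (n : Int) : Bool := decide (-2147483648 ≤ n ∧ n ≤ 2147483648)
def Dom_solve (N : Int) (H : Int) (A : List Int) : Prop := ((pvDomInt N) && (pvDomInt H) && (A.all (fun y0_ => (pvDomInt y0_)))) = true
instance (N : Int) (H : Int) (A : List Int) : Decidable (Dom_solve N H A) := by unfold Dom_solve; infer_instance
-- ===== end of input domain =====

-- B replaces A's O(N log H) binary search by sorting the gaps once and solving the
-- linear inequality for K in closed form on the crossing segment (O(N log N)).

-- ===== PORT A =====
-- is_ok(K): cnt = K; for i in range(N-1): cnt += min(A[i+1]-A[i], K); return cnt >= H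
def isOk (N : Int) (H : Int) (A : List Int) (K : Int) : Bool :=
  decide (H ≤ (PySem.List.pyRange 0 (N - 1) 1).foldl
    (fun cnt i => cnt + min (PySem.List.pyGetD A (i + 1) 0 - PySem.List.pyGetD A i 0) K) K)

-- while lo <= hi: mi = (lo+hi)//2; if is_ok(mi): res, hi = mi, mi-1 else lo = mi+1
def loopA (N : Int) (H : Int) (A : List Int) (res lo hi : Int) : Int :=
  if h : lo ≤ hi then
    let mi := PySem.Int.floordiv (lo + hi) 2
    if isOk N H A mi then loopA N H A mi lo (mi - 1)
    else loopA N H A res (mi + 1) hi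
  else res
termination_by (hi + 1 - lo).toNat
decreasing_by
  · have := PySem.Int.floordiv_two_mid_bounds h; omega
  · have := PySem.Int.floordiv_two_mid_bounds h; omega

def solve (N : Int) (H : Int) (A : List Int) : Int := loopA N H A (-1) 1 H

-- ===== PORT B =====
-- for g in gaps: R = min(H, g-1); if L <= R: K = max(L, ceil((H-s)/(rem+1))); if K <= R: return K
--               s += g; rem -= 1; L = max(L, g)
-- after loop: if L <= H: K = max(L, H-s); if K <= H: return K
-- return -1
def loopB (H : Int) (s rem L : Int) : List Int → Int
  | [] =>
    if L ≤ H then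
      let K := max L (H - s)
      if K ≤ H then K else -1
    else -1
  | g :: t =>
    let R := min H (g - 1)
    if L ≤ R then
      let K := max L (-(PySem.Int.floordiv (-(H - s)) (rem + 1)))
      if K ≤ R then K else loopB H (s + g) (rem - 1) (max L g) t
    else loopB H (s + g) (rem - 1) (max L g) t

def solve_alt (N : Int) (H : Int) (A : List Int) : Int :=
  let gaps := PySem.List.sorted
    ((PySem.List.pyRange 0 (N - 1) 1).map
      (fun i => PySem.List.pyGetD A (i + 1) 0 - PySem.List.pyGetD A i 0)) (fun x => x) false
  loopB H 0 (gaps.length : Int) 1 gaps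

-- ===== PRECONDITION & SPEC =====
-- Pre_ excludes N exceeding len(A) (with N ≥ 2): A raises IndexError whenever H ≥ 1;
-- for H ≤ 0 it returns -1 only because the binary-search range is empty and the gaps
-- are never read, while B builds the gap list up front and raises there.
def Pre_solve (N : Int) (H : Int) (A : List Int) : Prop := 2 ≤ N → N ≤ (A.length : Int)
instance (N : Int) (H : Int) (A : List Int) : Decidable (Pre_solve N H A) := by
  unfold Pre_solve; infer_instance

def pvWitness_solve : Int × Int × List Int := (3, 5, [1, 4, 9])

def Spec_solve (N : Int) (H : Int) (A : List Int) (out : Int) : Prop := out = solve_alt N H A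
instance (N : Int) (H : Int) (A : List Int) (out : Int) : Decidable (Spec_solve N H A out) := by
  unfold Spec_solve; infer_instance

-- ===== CLAIM (what is proved, stated in full; the proofs are below) =====
def Claim_equal_solve : Prop :=
  ∀ (N : Int) (H : Int) (A : List Int), Dom_solve N H A → Pre_solve N H A →
    Spec_solve N H A (solve N H A)

-- ===== LEMMAS AND PROOFS =====

-- the (unsorted) gap list both programs are about
def gapsL (N : Int) (A : List Int) : List Int :=
  (PySem.List.pyRange 0 (N - 1) 1).map
    (fun i => PySem.List.pyGetD A (i + 1) 0 - PySem.List.pyGetD A i 0)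

-- total damage dealt by poison duration K
def damage (gs : List Int) (K : Int) : Int := K + (gs.map (fun g => min g K)).sum

-- "r is the answer": -1 and nothing works, or least K in [1,H] with damage ≥ H
def IsAns (gs : List Int) (H r : Int) : Prop :=
  (r = -1 ∧ ∀ K, 1 ≤ K → K ≤ H → ¬ (H ≤ damage gs K)) ∨
  (1 ≤ r ∧ r ≤ H ∧ H ≤ damage gs r ∧ ∀ K, 1 ≤ K → K < r → ¬ (H ≤ damage gs K))

lemma isAns_unique {gs : List Int} {H r r' : Int}
    (h1 : IsAns gs H r) (h2 : IsAns gs H r') : r = r' := by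
  rcases h1 with ⟨e1, n1⟩ | ⟨a1, b1, c1, m1⟩ <;> rcases h2 with ⟨e2, n2⟩ | ⟨a2, b2, c2, m2⟩
  · omega
  · exact absurd c2 (n1 _ a2 b2)
  · exact absurd c1 (n2 _ a1 b1)
  · rcases lt_trichotomy r r' with h | h | h
    · exact absurd c1 (m2 _ a1 h)
    · exact h
    · exact absurd c2 (m1 _ a2 h)

lemma foldl_add_map {α : Type} (l : List α) (f : α → Int) :
    ∀ init : Int, l.foldl (fun c x => c + f x) init = init + (l.map f).sum := by
  induction l with
  | nil => intro init; simp
  | cons a t ih => intro init; simp [ih, add_assoc]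

lemma isOk_true_iff (N H : Int) (A : List Int) (K : Int) :
    isOk N H A K = true ↔ H ≤ damage (gapsL N A) K := by
  simp [isOk, damage, gapsL, foldl_add_map, List.map_map, Function.comp_def]

lemma damage_mono (gs : List Int) {K K' : Int} (h : K ≤ K') :
    damage gs K ≤ damage gs K' := by
  unfold damage
  have hs : (gs.map (fun g => min g K)).sum ≤ (gs.map (fun g => min g K')).sum := by
    apply List.sum_le_sum
    intro g _
    exact min_le_min le_rfl h
  omega

lemma sum_min_eq_len_mul (l : List Int) (K : Int) (h : ∀ e ∈ l, K < e) :
    (l.map (fun e => min e K)).sum = (l.length : Int) * K := by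
  induction l with
  | nil => simp
  | cons a t ih =>
    have ha : min a K = K := min_eq_right (le_of_lt (h a (List.mem_cons_self)))
    have ht := ih (fun e he => h e (List.mem_cons_of_mem a he))
    simp only [List.map_cons, List.sum_cons, ha, ht, List.length_cons]
    push_cast; ring

lemma loopA_isAns (N H : Int) (A : List Int) :
    ∀ (res lo hi : Int), 1 ≤ lo → hi ≤ H →
    (∀ K, 1 ≤ K → K < lo → ¬ (H ≤ damage (gapsL N A) K)) →
    ((res = -1 ∧ ∀ K, hi < K → K ≤ H → ¬ (H ≤ damage (gapsL N A) K)) ∨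
      (1 ≤ res ∧ res ≤ H ∧ H ≤ damage (gapsL N A) res ∧ res = hi + 1)) →
    IsAns (gapsL N A) H (loopA N H A res lo hi) := by
  intro res lo hi
  induction res, lo, hi using loopA.induct N H A with
  | case1 res lo hi hle mi hok ih =>
    intro hlo hhi hbelow hres
    have hok' : isOk N H A (PySem.Int.floordiv (lo + hi) 2) = true := hok
    rw [loopA]; simp only [dif_pos hle, hok', if_pos]
    have hmid := PySem.Int.floordiv_two_mid_bounds hle
    have hokm := (isOk_true_iff N H A mi).mp hok
    exact ih hlo (by omega) hbelow (Or.inr ⟨by omega, by omega, hokm, by omega⟩)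
  | case2 res lo hi hle mi hok ih =>
    intro hlo hhi hbelow hres
    have hok' : ¬ isOk N H A (PySem.Int.floordiv (lo + hi) 2) = true := hok
    rw [loopA]; simp only [dif_pos hle, hok', if_neg, Bool.false_eq_true, not_false_iff]
    have hmid := PySem.Int.floordiv_two_mid_bounds hle
    have hokm : ¬ (H ≤ damage (gapsL N A) mi) := by
      intro hc; exact absurd ((isOk_true_iff N H A mi).mpr hc) (by simp [hok])
    apply ih (by omega) hhi
    · intro K hK1 hK2
      by_cases hcase : K < lo
      · exact hbelow K hK1 hcase
      · intro hc
        exact hokm (le_trans hc (damage_mono _ (by omega)))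
    · exact hres
  | case3 res lo hi hle =>
    intro hlo hhi hbelow hres
    rw [loopA]; simp only [hle, dif_neg, not_false_iff]
    rcases hres with ⟨he, hn⟩ | ⟨h1, h2, h3, h4⟩
    · left
      refine ⟨he, fun K hK1 hK2 => ?_⟩
      by_cases hcase : K < lo
      · exact hbelow K hK1 hcase
      · exact hn K (by omega) hK2
    · right
      exact ⟨h1, h2, h3, fun K hK1 hK2 => hbelow K hK1 (by omega)⟩

lemma solve_isAns (N H : Int) (A : List Int) : IsAns (gapsL N A) H (solve N H A) := by
  unfold solve
  apply loopA_isAns N H A (-1) 1 H le_rfl le_rfl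
  · intro K hK1 hK2; omega
  · left; exact ⟨rfl, fun K hK1 hK2 => by omega⟩

-- ceiling division as B computes it
lemma ceil_spec (a b : Int) (hb : 0 < b) :
    (-(PySem.Int.floordiv (-a) b) - 1) * b < a ∧ a ≤ -(PySem.Int.floordiv (-a) b) * b := by
  have := (PySem.Int.neg_floordiv_neg_eq_iff_of_pos (a := a) (b := b)
    (q := -(PySem.Int.floordiv (-a) b)) hb).mp rfl
  omega

lemma loopB_isAns (H : Int) (full : List Int) :
    ∀ (gs : List Int) (s rem L : Int),
    gs.Pairwise (· ≤ ·) → rem = (gs.length : Int) → 1 ≤ L →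
    (∀ K, L ≤ K → damage full K = K + s + (gs.map (fun g => min g K)).sum) →
    (∀ K, 1 ≤ K → K ≤ H → K < L → ¬ (H ≤ damage full K)) →
    IsAns full H (loopB H s rem L gs) := by
  intro gs
  induction gs with
  | nil =>
    intro s rem L _ _ hL hform hbelow
    simp only [loopB]
    have hformK : ∀ K, L ≤ K → damage full K = K + s := by
      intro K hK; simpa using hform K hK
    split_ifs with h1 h2
    · -- return max L (H - s)
      right
      refine ⟨by omega, h2, ?_, ?_⟩
      · rw [hformK _ (le_max_left _ _)]
        have := le_max_right L (H - s); omega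
      · intro K hK1 hK2
        by_cases hc : K < L
        · exact hbelow K hK1 (by omega) hc
        · rw [hformK K (by omega)]; omega
    · -- L ≤ H but max L (H - s) > H : nothing works
      left
      refine ⟨rfl, fun K hK1 hK2 => ?_⟩
      by_cases hc : K < L
      · exact hbelow K hK1 hK2 hc
      · rw [hformK K (by omega)]; omega
    · -- L > H : segment empty for the rest
      left
      exact ⟨rfl, fun K hK1 hK2 => hbelow K hK1 hK2 (by omega)⟩
  | cons g t ih =>
    intro s rem L hsort hrem hL hform hbelow
    have hgt : ∀ e ∈ t, g ≤ e := fun e he => (List.pairwise_cons.mp hsort).1 e he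
    have htsort : t.Pairwise (· ≤ ·) := (List.pairwise_cons.mp hsort).2
    -- in the segment L ≤ K < g the damage is linear: s + (rem+1)*K
    have hseg : ∀ K, L ≤ K → K < g → damage full K = s + (rem + 1) * K := by
      intro K hK1 hK2
      rw [hform K hK1]
      rw [sum_min_eq_len_mul (g :: t) K (by
        intro e he
        rcases List.mem_cons.mp he with rfl | he'
        · exact hK2
        · exact lt_of_lt_of_le hK2 (hgt e he'))]
      rw [hrem]; ring
    -- invariants for the recursive call
    have hform' : ∀ K, max L g ≤ K →
        damage full K = K + (s + g) + (t.map (fun e => min e K)).sum := by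
      intro K hK
      rw [hform K (le_trans (le_max_left _ _) hK)]
      have : min g K = g := min_eq_left (le_trans (le_max_right _ _) hK)
      simp only [List.map_cons, List.sum_cons, this]; ring
    have hrem' : rem - 1 = (t.length : Int) := by
      simp only [List.length_cons] at hrem; push_cast at hrem ⊢; omega
    have hremPos : 1 ≤ rem := by rw [hrem, List.length_cons]; push_cast; omega
    simp only [loopB]
    split_ifs with h1 h2
    · -- L ≤ min H (g-1) and K := max L (ceil) ≤ min H (g-1) : return K
      set q := -(PySem.Int.floordiv (-(H - s)) (rem + 1)) with hq
      have hc := ceil_spec (H - s) (rem + 1) (by omega)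
      right
      refine ⟨by omega, by omega, ?_, ?_⟩
      · rw [hseg _ (le_max_left _ _) (by omega)]
        have hKq : q ≤ max L q := le_max_right _ _
        nlinarith [hc.2]
      · intro K hK1 hK2
        by_cases hcase : K < L
        · exact hbelow K hK1 (by omega) hcase
        · rw [hseg K (by omega) (by omega)]
          have hKq : K < q := by
            rcases max_cases L q with ⟨he, _⟩ | ⟨he, _⟩ <;> omega
          nlinarith [hc.1]
    · -- segment nonempty but crossing point beyond it: recurse
      set q := -(PySem.Int.floordiv (-(H - s)) (rem + 1)) with hq
      have hc := ceil_spec (H - s) (rem + 1) (by omega)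
      apply ih (s + g) (rem - 1) (max L g) htsort hrem' (by omega) hform'
      intro K hK1 hK2 hK3
      by_cases hcase : K < L
      · exact hbelow K hK1 hK2 hcase
      · rw [hseg K (by omega) (by omega)]
        have hKq : K < q := by
          have : K ≤ min H (g - 1) := by omega
          rcases max_cases L q with ⟨he, _⟩ | ⟨he, _⟩ <;> omega
        nlinarith [hc.1]
    · -- empty segment: recurse
      apply ih (s + g) (rem - 1) (max L g) htsort hrem' (by omega) hform'
      intro K hK1 hK2 hK3
      by_cases hcase : K < L
      · exact hbelow K hK1 hK2 hcase
      · omega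

lemma solve_alt_isAns (N H : Int) (A : List Int) : IsAns (gapsL N A) H (solve_alt N H A) := by
  unfold solve_alt
  set gsort := PySem.List.sorted (gapsL N A) (fun x => x) false with hgs
  have hperm : gsort.Perm (gapsL N A) := PySem.List.sorted_perm _ _ _
  apply loopB_isAns H (gapsL N A) gsort 0 (gsort.length : Int) 1
    (by simpa using PySem.List.sorted_pairwise (gapsL N A) (fun x => x)) rfl le_rfl
  · intro K _
    unfold damage
    have := (hperm.map (fun g => min g K)).sum_eq
    omega
  · intro K hK1 hK2 hK3; omega

-- ===== VERDICT (by name: the statement is the Claim_ definition above) =====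
theorem solve_spec : Claim_equal_solve := by
  intro N H A _ _
  unfold Spec_solve
  exact isAns_unique (solve_isAns N H A) (solve_alt_isAns N H A)
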